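-- pv_equiv track=rewrite | github.com/sion9262/TIL | algorithm/코딩구현력기르기/자릿수의합.py | solve
-- ===== SOURCE A (Python) =====
-- def digit_sum(x):
--     sum = 0
--     while x > 0:
--         sum += x % 10
--         x = x // 10
--     return sum
--
-- def solve(nums, n):
--     answer = 0
--     max = -1
--     for num in nums:
--         sum = digit_sum(num)
--         if max < sum:
--             answer = num
--             max = sum
--
--     return answer
-- ===== SOURCE B (Python) =====
-- def digit_sum(x):
--     sum = 0
--     while x > 0:
--         sum += x % 10
--         x = x // 10
--     return sum
--
-- def solve(nums, n):
--     if not nums: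
--         return 0
--     return sorted(nums, key=digit_sum, reverse=True)[0]
-- ===== Notes on version B (the rewrite author's own statement) =====
-- stated objective: alternative
-- what changed: Replaces the incremental strict-max tracking scan with sort-by-digit-sum descending and taking the front element; Python's stable sort preserves first-on-tie exactly like A's strict '<' update.
import Mathlib
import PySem

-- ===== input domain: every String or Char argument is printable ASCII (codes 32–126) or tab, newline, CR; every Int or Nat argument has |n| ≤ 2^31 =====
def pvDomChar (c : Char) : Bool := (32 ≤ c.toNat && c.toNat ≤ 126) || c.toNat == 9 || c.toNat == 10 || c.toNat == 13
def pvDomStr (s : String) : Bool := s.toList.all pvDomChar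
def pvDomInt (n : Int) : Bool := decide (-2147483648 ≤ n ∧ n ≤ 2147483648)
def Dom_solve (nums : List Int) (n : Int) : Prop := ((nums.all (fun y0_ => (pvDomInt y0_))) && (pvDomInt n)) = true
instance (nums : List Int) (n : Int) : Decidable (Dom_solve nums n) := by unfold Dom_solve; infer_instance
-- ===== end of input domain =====

-- B replaces A's incremental strict-max scan with sort-by-digit-sum descending + take the front
-- element (stable sort keeps the first number on ties, exactly like A's strict '<'); objective: alternative.

-- ===== PORT A =====
-- digit_sum's while loop, tail-recursive on the running sum (shared verbatim by both Pythons)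
def digitSumLoop (x sum : Int) : Int :=
  if h : 0 < x then digitSumLoop (PySem.Int.floordiv x 10) (sum + PySem.Int.mod x 10) else sum
termination_by x.toNat
decreasing_by
  rw [PySem.Int.floordiv_eq_ediv_of_pos (by norm_num)]
  omega

def digit_sum_ (x : Int) : Int := digitSumLoop x 0

def solve (nums : List Int) (n : Int) : Int :=
  (nums.foldl (fun s num =>
      let sum := digit_sum_ num
      if s.2 < sum then (num, sum) else s) ((0 : Int), (-1 : Int))).1

-- ===== PORT B =====
def solve_alt (nums : List Int) (n : Int) : Int :=
  if nums = [] then 0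
  else (PySem.List.sorted nums digit_sum_ true).headD 0

-- ===== PRECONDITION & SPEC =====
def Spec_solve (nums : List Int) (n : Int) (out : Int) : Prop := out = solve_alt nums n
instance (nums : List Int) (n : Int) (out : Int) : Decidable (Spec_solve nums n out) := by unfold Spec_solve; infer_instance

-- ===== CLAIM (what is proved, stated in full; the proofs are below) =====
def Claim_equal_solve : Prop := ∀ (nums : List Int) (n : Int), Dom_solve nums n → Spec_solve nums n (solve nums n)

-- ===== LEMMAS AND PROOFS =====

theorem digitSumLoop_ge : ∀ (fuel : Nat) (x s : Int), x.toNat ≤ fuel → s ≤ digitSumLoop x s := by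
  intro fuel
  induction fuel with
  | zero =>
    intro x s h
    rw [digitSumLoop]
    have hx : ¬ 0 < x := by omega
    simp [hx]
  | succ m ih =>
    intro x s h
    rw [digitSumLoop]
    split
    · rename_i hx
      have hmod : 0 ≤ PySem.Int.mod x 10 := PySem.Int.mod_nonneg x (by norm_num)
      have hdiv : (PySem.Int.floordiv x 10).toNat ≤ m := by
        rw [PySem.Int.floordiv_eq_ediv_of_pos (by norm_num)]
        omega
      have := ih (PySem.Int.floordiv x 10) (s + PySem.Int.mod x 10) hdiv
      omega
    · exact le_refl s

theorem digit_sum_nonneg (x : Int) : 0 ≤ digit_sum_ x :=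
  digitSumLoop_ge x.toNat x 0 (le_refl _)

-- A's loop after the first element: the pair state is determined by its first component
theorem foldA (t : List Int) : ∀ (a : Int),
    t.foldl (fun s num =>
        let sum := digit_sum_ num
        if s.2 < sum then (num, sum) else s) (a, digit_sum_ a)
    = (t.foldl (fun b x => if digit_sum_ b < digit_sum_ x then x else b) a,
       digit_sum_ (t.foldl (fun b x => if digit_sum_ b < digit_sum_ x then x else b) a)) := by
  induction t with
  | nil => intro a; rfl
  | cons h t ih =>
    intro a
    simp only [List.foldl]
    by_cases hc : digit_sum_ a < digit_sum_ h
    · simp only [hc, if_pos]; exact ih h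
    · simp only [hc, if_false]; exact ih a

-- head of the insertion-sort fold evolves exactly like A's running first-max
theorem headFold (t : List Int) : ∀ (a : Int) (rest : List Int),
    (t.foldl (fun acc x =>
        PySem.List.insertBy (fun p q => decide (digit_sum_ q < digit_sum_ p)) x acc) (a :: rest)).headD 0
    = t.foldl (fun b x => if digit_sum_ b < digit_sum_ x then x else b) a := by
  induction t with
  | nil => intro a rest; rfl
  | cons h t ih =>
    intro a rest
    simp only [List.foldl, PySem.List.insertBy]
    by_cases hc : digit_sum_ a < digit_sum_ h
    · simp only [hc, decide_true, if_pos]; exact ih h (a :: rest)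
    · simp only [hc, decide_false, Bool.false_eq_true, if_false]
      exact ih a _

-- ===== VERDICT (by name: the statement is the Claim_ definition above) =====
theorem solve_spec : Claim_equal_solve := by
  intro nums n _
  unfold Spec_solve solve solve_alt
  cases nums with
  | nil => rfl
  | cons h t =>
    simp only [List.foldl, reduceCtorEq, if_false]
    have h0 : (-1 : Int) < digit_sum_ h := by have := digit_sum_nonneg h; omega
    simp only [h0, if_pos]
    rw [foldA, PySem.List.sorted_rev_eq_foldl_insertBy]
    simp only [List.foldl, PySem.List.insertBy]
    rw [headFold]
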